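-- pv_equiv track=rewrite | github.com/henrywoodefct/efct_demo_13monjas | src/build_feed.py | _urgency_summary
-- ===== SOURCE A (Python) =====
-- def _urgency_summary(top_actions: list[dict]) -> str:
--     counts = {"Now": 0, "Next 3h": 0, "Monitor": 0}
--     for a in top_actions:
--         u = a.get("urgency")
--         if u in counts:
--             counts[u] += 1
--     parts = []
--     if counts["Now"]:
--         parts.append(f"{counts['Now']} Now")
--     if counts["Next 3h"]:
--         parts.append(f"{counts['Next 3h']} Next 3h")
--     if counts["Monitor"]:
--         parts.append(f"{counts['Monitor']} Monitor")
--     return " • ".join(parts) if parts else "No actions"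
-- ===== SOURCE B (Python) =====
-- def _urgency_summary(top_actions: list[dict]) -> str:
--     parts = []
--     for u in ["Now", "Next 3h", "Monitor"]:
--         c = sum(1 for a in top_actions if a.get("urgency") == u)
--         if c:
--             parts.append(f"{c} {u}")
--     return " • ".join(parts) if parts else "No actions"
-- ===== Notes on version B (the rewrite author's own statement) =====
-- stated objective: simpler
-- what changed: Replaces the mutable counts dict plus three hard-coded if-blocks with one loop over the ordered category list that counts each category by an independent scan and formats its part in place.
import Mathlib
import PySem

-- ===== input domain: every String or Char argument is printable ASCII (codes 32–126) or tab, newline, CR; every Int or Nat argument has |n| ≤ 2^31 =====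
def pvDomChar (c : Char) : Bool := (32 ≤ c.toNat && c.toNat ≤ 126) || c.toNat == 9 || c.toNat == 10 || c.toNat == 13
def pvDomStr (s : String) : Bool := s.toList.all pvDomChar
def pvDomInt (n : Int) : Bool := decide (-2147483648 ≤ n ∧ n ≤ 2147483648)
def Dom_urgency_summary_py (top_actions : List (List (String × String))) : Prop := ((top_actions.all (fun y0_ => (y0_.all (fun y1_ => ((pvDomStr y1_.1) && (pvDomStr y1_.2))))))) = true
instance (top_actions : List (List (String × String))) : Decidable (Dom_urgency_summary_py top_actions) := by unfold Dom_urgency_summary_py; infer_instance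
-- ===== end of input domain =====

-- B replaces A's mutable counts dict and three hard-coded if-blocks by one loop over the
-- ordered category list, counting each category with an independent scan (objective: simpler).

-- ===== PORT A =====
def urgency_summary_py (top_actions : List (List (String × String))) : String :=
  let counts : PySem.Dict String Int := PySem.Dict.mk [("Now", 0), ("Next 3h", 0), ("Monitor", 0)]
  let counts := top_actions.foldl (fun counts a =>
    match (PySem.Dict.mk a).get? "urgency" with
    | none => counts
    | some u => if counts.contains u then counts.modify u 0 (· + 1) else counts) counts
  let parts : List String := []
  let parts := if counts.getD "Now" 0 ≠ 0 then parts ++ [PySem.Int.toStr (counts.getD "Now" 0) ++ " Now"] else parts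
  let parts := if counts.getD "Next 3h" 0 ≠ 0 then parts ++ [PySem.Int.toStr (counts.getD "Next 3h" 0) ++ " Next 3h"] else parts
  let parts := if counts.getD "Monitor" 0 ≠ 0 then parts ++ [PySem.Int.toStr (counts.getD "Monitor" 0) ++ " Monitor"] else parts
  if parts ≠ [] then PySem.Str.join " • " parts else "No actions"

-- ===== PORT B =====
def urgency_summary_py_alt (top_actions : List (List (String × String))) : String :=
  let parts := (["Now", "Next 3h", "Monitor"] : List String).foldl (fun parts u =>
    let c : Int := top_actions.foldl (fun c a =>
      if (PySem.Dict.mk a).get? "urgency" == some u then c + 1 else c) 0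
    if c ≠ 0 then parts ++ [PySem.Int.toStr c ++ (" " ++ u)] else parts) []
  if parts ≠ [] then PySem.Str.join " • " parts else "No actions"

-- ===== PRECONDITION & SPEC =====
def Spec_urgency_summary_py (top_actions : List (List (String × String))) (out : String) : Prop := out = urgency_summary_py_alt top_actions
instance (top_actions : List (List (String × String))) (out : String) : Decidable (Spec_urgency_summary_py top_actions out) := by unfold Spec_urgency_summary_py; infer_instance

-- ===== CLAIM (what is proved, stated in full; the proofs are below) =====
def Claim_equal_urgency_summary_py : Prop := ∀ (top_actions : List (List (String × String))), Dom_urgency_summary_py top_actions → Spec_urgency_summary_py top_actions (urgency_summary_py top_actions)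

-- ===== LEMMAS AND PROOFS =====

-- shorthand used only in the proofs: B's independent count of category u
def pvCnt (u : String) (ta : List (List (String × String))) : Int :=
  ta.foldl (fun c a => if (PySem.Dict.mk a).get? "urgency" == some u then c + 1 else c) 0

lemma pvCnt_shift (u : String) (ta : List (List (String × String))) :
    ∀ c : Int, ta.foldl (fun c a => if (PySem.Dict.mk a).get? "urgency" == some u then c + 1 else c) c
      = c + pvCnt u ta := by
  induction ta with
  | nil => intro c; simp [pvCnt]
  | cons b tb ih =>
    intro c
    simp only [pvCnt, List.foldl_cons]
    rw [ih, ih]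
    split <;> ring

lemma pvCnt_cons (u : String) (a : List (String × String)) (ta : List (List (String × String))) :
    pvCnt u (a :: ta) = (if (PySem.Dict.mk a).get? "urgency" == some u then 1 else 0) + pvCnt u ta := by
  have h0 : pvCnt u (a :: ta)
      = ta.foldl (fun c a => if (PySem.Dict.mk a).get? "urgency" == some u then c + 1 else c)
          (if (PySem.Dict.mk a).get? "urgency" == some u then 0 + 1 else 0) := rfl
  rw [h0, pvCnt_shift]
  split <;> ring

lemma foldA_counts (ta : List (List (String × String))) (i j k : Int) :
    ta.foldl (fun counts a =>
      match (PySem.Dict.mk a).get? "urgency" with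
      | none => counts
      | some u => if counts.contains u then counts.modify u 0 (· + 1) else counts)
      (PySem.Dict.mk [("Now", i), ("Next 3h", j), ("Monitor", k)])
    = PySem.Dict.mk [("Now", i + pvCnt "Now" ta),
                     ("Next 3h", j + pvCnt "Next 3h" ta),
                     ("Monitor", k + pvCnt "Monitor" ta)] := by
  induction ta generalizing i j k with
  | nil => simp [pvCnt]
  | cons a tb ih =>
    rw [List.foldl_cons, pvCnt_cons, pvCnt_cons, pvCnt_cons]
    cases hget : (PySem.Dict.mk a).get? "urgency" with
    | none => simp only [hget]; rw [ih]; simp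
    | some u =>
      simp only [hget]
      by_cases h1 : u = "Now"
      · subst h1
        have hstep : ((PySem.Dict.mk [("Now", i), ("Next 3h", j), ("Monitor", k)]).contains "Now" = true)
            := by simp
        have hmod : (PySem.Dict.mk [("Now", i), ("Next 3h", j), ("Monitor", k)]).modify "Now" 0 (· + 1)
            = PySem.Dict.mk [("Now", i + 1), ("Next 3h", j), ("Monitor", k)] := by
          apply PySem.Dict.ext
          simp [PySem.Dict.modify, PySem.Dict.items_insert, PySem.Dict.getD_eq_get?_getD,
            PySem.Dict.get?_mk_cons]
        rw [if_pos hstep, hmod, ih]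
        apply PySem.Dict.ext
        simp [add_assoc]
      · by_cases h2 : u = "Next 3h"
        · subst h2
          have hstep : ((PySem.Dict.mk [("Now", i), ("Next 3h", j), ("Monitor", k)]).contains "Next 3h" = true)
              := by simp
          have hmod : (PySem.Dict.mk [("Now", i), ("Next 3h", j), ("Monitor", k)]).modify "Next 3h" 0 (· + 1)
              = PySem.Dict.mk [("Now", i), ("Next 3h", j + 1), ("Monitor", k)] := by
            apply PySem.Dict.ext
            simp [PySem.Dict.modify, PySem.Dict.items_insert, PySem.Dict.getD_eq_get?_getD,
              PySem.Dict.get?_mk_cons]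
          rw [if_pos hstep, hmod, ih]
          apply PySem.Dict.ext
          simp [add_assoc]
        · by_cases h3 : u = "Monitor"
          · subst h3
            have hstep : ((PySem.Dict.mk [("Now", i), ("Next 3h", j), ("Monitor", k)]).contains "Monitor" = true)
                := by simp
            have hmod : (PySem.Dict.mk [("Now", i), ("Next 3h", j), ("Monitor", k)]).modify "Monitor" 0 (· + 1)
                = PySem.Dict.mk [("Now", i), ("Next 3h", j), ("Monitor", k + 1)] := by
              apply PySem.Dict.ext
              simp [PySem.Dict.modify, PySem.Dict.items_insert, PySem.Dict.getD_eq_get?_getD,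
                PySem.Dict.get?_mk_cons]
            rw [if_pos hstep, hmod, ih]
            apply PySem.Dict.ext
            simp [add_assoc]
          · have hcontains : ((PySem.Dict.mk [("Now", i), ("Next 3h", j), ("Monitor", k)]).contains u = false)
                := by
              simp only [PySem.Dict.contains_mk, List.any_cons, List.any_nil, Bool.or_false]
              simp [Ne.symm h1, Ne.symm h2, Ne.symm h3]
            rw [if_neg (by simp [hcontains]), ih]
            apply PySem.Dict.ext
            simp [h1, h2, h3]

-- ===== VERDICT (by name: the statement is the Claim_ definition above) =====
theorem urgency_summary_py_spec : Claim_equal_urgency_summary_py := by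
  intro ta _
  show urgency_summary_py ta = urgency_summary_py_alt ta
  simp only [urgency_summary_py, urgency_summary_py_alt]
  rw [foldA_counts]
  have hc : ∀ u : String,
      ta.foldl (fun c a => if (PySem.Dict.mk a).get? "urgency" == some u then c + 1 else c) 0
        = pvCnt u ta := fun _ => rfl
  simp only [List.foldl_cons, List.foldl_nil, hc]
  have e1 : ((" " : String) ++ "Now") = " Now" := rfl
  have e2 : ((" " : String) ++ "Next 3h") = " Next 3h" := rfl
  have e3 : ((" " : String) ++ "Monitor") = " Monitor" := rfl
  simp [PySem.Dict.getD_eq_get?_getD, PySem.Dict.get?_mk_cons, e1, e2, e3]
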